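-- pv_equiv track=rewrite | github.com/tonybnya/fcc-daily-coding-challenge | fcc_085_message_validator.py | is_valid_message
-- ===== SOURCE A (Python) =====
-- def is_valid_message(message: str, validation: str) -> bool:
--     words: list[str] = message.split()
--     if len(words) != len(validation):
--         return False
--     i: int = 0
--     for word in words:
--         if word[0].lower() != validation[i].lower():
--             return False
--         i += 1
--     return True
-- ===== SOURCE B (Python) =====
-- def is_valid_message(message: str, validation: str) -> bool:
--     # Single character-level scan: no word list is ever built.  A state flag
--     # marks word starts; each word-initial character is matched against the
--     # next validation character; at the end the counts must agree.
--     i = 0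
--     prev_space = True
--     for ch in message:
--         if ch.isspace():
--             prev_space = True
--         elif prev_space:
--             if i >= len(validation) or ch.lower() != validation[i].lower():
--                 return False
--             i += 1
--             prev_space = False
--         else:
--             prev_space = False
--     return i == len(validation)
-- ===== Notes on version B (the rewrite author's own statement) =====
-- stated objective: alternative
-- what changed: Instead of splitting the message into a word list, checking its length and looping over the words, B runs a character-level state machine over the raw message (a word-start flag plus a validation cursor), matching each word-initial character as it is encountered and checking the count at the end.
import Mathlib
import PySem

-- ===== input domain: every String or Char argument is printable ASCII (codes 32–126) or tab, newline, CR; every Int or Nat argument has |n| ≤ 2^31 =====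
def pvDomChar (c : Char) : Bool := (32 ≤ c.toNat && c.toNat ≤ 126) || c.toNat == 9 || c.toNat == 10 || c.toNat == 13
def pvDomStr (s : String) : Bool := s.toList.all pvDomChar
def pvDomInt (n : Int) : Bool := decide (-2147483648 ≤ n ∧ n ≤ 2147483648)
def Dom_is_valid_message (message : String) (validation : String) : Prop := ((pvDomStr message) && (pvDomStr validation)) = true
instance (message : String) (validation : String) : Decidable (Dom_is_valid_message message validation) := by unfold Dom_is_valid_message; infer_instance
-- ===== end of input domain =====

-- B replaces A's split-into-words + length guard + indexed word loop by a single
-- character-level state machine over the raw message (objective: alternative).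

-- ===== PORT A =====
-- the 'for word in words' loop with its running index i and early 'return False'
def pvLoopA (words : List (List Char)) (validation : List Char) (i : Int) : Bool :=
  match words with
  | [] => true
  | w :: ws =>
    if PySem.Chars.lowerChar (PySem.List.pyGetD w 0 ' ')
        ≠ PySem.Chars.lowerChar (PySem.List.pyGetD validation i ' ')
    then false
    else pvLoopA ws validation (i + 1)

def is_valid_message (message : String) (validation : String) : Bool :=
  let words : List (List Char) := PySem.Chars.split₀ message.toList
  if words.length ≠ validation.toList.length then false
  else pvLoopA words validation.toList 0

-- ===== PORT B =====
-- the 'for ch in message' state machine: cursor i into validation, word-start flag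
def pvScanB (cs : List Char) (v : List Char) (i : Nat) (prevSpace : Bool) : Bool :=
  match cs with
  | [] => i == v.length
  | c :: rest =>
    if PySem.Chars.isspace c then pvScanB rest v i true
    else if prevSpace then
      if i ≥ v.length ∨ PySem.Chars.lowerChar c ≠ PySem.Chars.lowerChar (v.getD i ' ')
      then false
      else pvScanB rest v (i + 1) false
    else pvScanB rest v i false

def is_valid_message_alt (message : String) (validation : String) : Bool :=
  pvScanB message.toList validation.toList 0 true

-- ===== PRECONDITION & SPEC =====
def Spec_is_valid_message (message : String) (validation : String) (out : Bool) : Prop := out = is_valid_message_alt message validation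
instance (message : String) (validation : String) (out : Bool) : Decidable (Spec_is_valid_message message validation out) := by unfold Spec_is_valid_message; infer_instance

-- ===== CLAIM (what is proved, stated in full; the proofs are below) =====
def Claim_equal_is_valid_message : Prop := ∀ (message : String) (validation : String), Dom_is_valid_message message validation → Spec_is_valid_message message validation (is_valid_message message validation)

-- ===== LEMMAS AND PROOFS =====

-- the sequence of word-initial characters of the remaining input, given the word-start flag
def pvInits (cs : List Char) (prevSpace : Bool) : List Char :=
  match cs with
  | [] => []
  | c :: rest =>
    if PySem.Chars.isspace c then pvInits rest true
    else if prevSpace then c :: pvInits rest false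
    else pvInits rest false

lemma pv_pyGetD_zero (w : List Char) : PySem.List.pyGetD w 0 ' ' = w.headD ' ' := by
  cases w <;> simp [PySem.List.pyGetD, PySem.List.pyIdx?, PySem.List.pyGet?]

-- A's loop from index n over equal remaining lengths is the mapped comparison on the tail
lemma pvLoopA_eq (words : List (List Char)) (v : List Char) (n : Nat)
    (h : n + words.length = v.length) :
    pvLoopA words v (n : Int)
      = ((words.map (fun w => PySem.Chars.lowerChar (PySem.List.pyGetD w 0 ' ')))
          == (v.drop n).map PySem.Chars.lowerChar) := by
  induction words generalizing n with
  | nil =>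
    simp only [List.length_nil] at h
    simp [pvLoopA, List.drop_of_length_le (by omega : v.length ≤ n)]
  | cons w ws ih =>
    have hn : n < v.length := by simp at h; omega
    have hdrop : v.drop n = v[n] :: v.drop (n + 1) := List.drop_eq_getElem_cons hn
    have hget : PySem.List.pyGetD v (n : Int) ' ' = v[n] := by
      simp [PySem.List.pyGetD_natCast, List.getD_eq_getElem?_getD, hn]
    have hcast : ((n : Int) + 1) = ((n + 1 : Nat) : Int) := by push_cast; ring
    rw [pvLoopA, hget, hcast, ih (n + 1) (by simp at h ⊢; omega), hdrop]
    simp only [List.map_cons, List.cons_beq_cons]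
    by_cases hc : PySem.Chars.lowerChar (PySem.List.pyGetD w 0 ' ') = PySem.Chars.lowerChar v[n]
    · simp [hc]
    · simp [beq_iff_eq, hc]

-- split₀'s worker: the word-initial characters of its output, as pvInits
lemma pv_split_go_inits (cs cur : List Char) (acc : List (List Char)) :
    (PySem.Chars.split₀.go cs cur acc).map (fun w => PySem.List.pyGetD w 0 ' ')
      = acc.reverse.map (fun w => PySem.List.pyGetD w 0 ' ')
        ++ (if cur.isEmpty then [] else [cur.reverse.headD ' '])
        ++ pvInits cs cur.isEmpty := by
  induction cs generalizing cur acc with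
  | nil =>
    cases cur with
    | nil => simp [PySem.Chars.split₀.go, pvInits]
    | cons a as => simp [PySem.Chars.split₀.go, pvInits, pv_pyGetD_zero]
  | cons c rest ih =>
    by_cases hs : PySem.Chars.isspace c
    · cases cur with
      | nil => simp [PySem.Chars.split₀.go, hs, pvInits, ih]
      | cons a as =>
        rw [PySem.Chars.split₀.go]
        simp only [hs, if_true, List.isEmpty_cons, Bool.false_eq_true, if_false]
        rw [ih]
        simp [pvInits, hs, pv_pyGetD_zero]
    · cases cur with
      | nil => simp [PySem.Chars.split₀.go, hs, pvInits, ih]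
      | cons a as => simp [PySem.Chars.split₀.go, hs, pvInits, ih]

-- B's scan is the mapped comparison of the remaining initials against the remaining validation
lemma pvScanB_eq (cs v : List Char) (i : Nat) (p : Bool) (hi : i ≤ v.length) :
    pvScanB cs v i p
      = ((pvInits cs p).map PySem.Chars.lowerChar == (v.drop i).map PySem.Chars.lowerChar) := by
  induction cs generalizing i p with
  | nil =>
    rw [pvScanB, pvInits]
    rcases Nat.lt_or_ge i v.length with h | h
    · have hne : v.drop i ≠ [] := by simp [List.drop_eq_nil_iff]; omega
      rcases List.exists_cons_of_ne_nil hne with ⟨x, xs, hx⟩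
      simp [hx, Nat.ne_of_lt h]
    · have hieq : i = v.length := by omega
      simp [hieq]
  | cons c rest ih =>
    rw [pvScanB, pvInits]
    by_cases hs : PySem.Chars.isspace c
    · simp only [hs, if_true]; exact ih i true hi
    · simp only [hs, if_false, Bool.false_eq_true]
      cases p with
      | false => exact ih i false hi
      | true =>
        simp only [if_true]
        rcases Nat.lt_or_ge i v.length with h | h
        · have hdrop : v.drop i = v[i] :: v.drop (i + 1) := List.drop_eq_getElem_cons h
          have hget : v.getD i ' ' = v[i] := by
            simp [List.getD_eq_getElem?_getD, List.getElem?_eq_getElem h]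
          have hdm : List.drop i (v.map PySem.Chars.lowerChar)
              = PySem.Chars.lowerChar v[i] :: List.drop (i + 1) (v.map PySem.Chars.lowerChar) := by
            rw [← List.map_drop, hdrop, List.map_cons, List.map_drop]
          by_cases hc : PySem.Chars.lowerChar c = PySem.Chars.lowerChar v[i]
          · rw [if_neg (by rw [hget]; simp [hc]; omega),
              ih (i + 1) false (by omega), hdrop]
            simp [hc, hdm]
          · rw [if_pos (Or.inr (by rw [hget]; exact hc)), hdrop]
            simp [hdm, hc]
        · have hieq : i = v.length := by omega
          rw [if_pos (Or.inl h)]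
          simp [hieq]

-- ===== VERDICT (by name: the statement is the Claim_ definition above) =====
theorem is_valid_message_spec : Claim_equal_is_valid_message := by
  intro message validation _
  unfold Spec_is_valid_message is_valid_message is_valid_message_alt
  set v := validation.toList with hv
  have hinit : (PySem.Chars.split₀ message.toList).map (fun w => PySem.List.pyGetD w 0 ' ')
      = pvInits message.toList true := by
    have := pv_split_go_inits message.toList [] []
    simpa [PySem.Chars.split₀] using this
  rw [pvScanB_eq message.toList v 0 true (Nat.zero_le _), List.drop_zero]
  set ws := PySem.Chars.split₀ message.toList with hws
  by_cases hlen : ws.length = v.length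
  · rw [if_neg (by simp [hlen])]
    have h0 := pvLoopA_eq ws v 0 (by omega)
    rw [Nat.cast_zero] at h0
    rw [h0, List.drop_zero, ← hinit, List.map_map]
    rfl
  · rw [if_pos hlen]
    have hlen' : (pvInits message.toList true).length ≠ v.length := by
      rw [← hinit]; simpa using hlen
    have hne : ¬ ((pvInits message.toList true).map PySem.Chars.lowerChar
          = v.map PySem.Chars.lowerChar) := by
      intro he
      have := congrArg List.length he
      simp at this
      exact hlen' this
    exact (beq_eq_false_iff_ne.mpr hne).symm
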